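-- pv_equiv track=rewrite | github.com/LuisMars/zinewire | src/zinewire/imposition.py | compute_imposition_order
-- ===== SOURCE A (Python) =====
-- def compute_imposition_order(total_pages: int) -> tuple[list[tuple[int, int]], int]:
--     """Compute saddle-stitch page pairing for N pages.
--
--     Returns (sheets, padded_count) where sheets is a list of
--     (left_idx, right_idx) tuples (0-indexed page indices).
--
--     For 16 pages:
--         Sheet 1 front: (15, 0)  -> page 16 | page 1
--         Sheet 1 back:  (1, 14)  -> page 2  | page 15
--         Sheet 2 front: (13, 2)  -> page 14 | page 3
--         Sheet 2 back:  (3, 12)  -> page 4  | page 13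
--         ...
--     """
--     # Pad to multiple of 4
--     padded = total_pages
--     if padded % 4 != 0:
--         padded += 4 - (padded % 4)
--
--     sheets = []
--     for i in range(padded // 4):
--         front_left = padded - 1 - (2 * i)
--         front_right = 2 * i
--         back_left = 2 * i + 1
--         back_right = padded - 2 - (2 * i)
--
--         sheets.append((front_left, front_right))
--         sheets.append((back_left, back_right))
--
--     return sheets, padded
-- ===== SOURCE B (Python) =====
-- from collections import deque
--
--
-- def compute_imposition_order(total_pages: int) -> tuple[list[tuple[int, int]], int]:
--     """Compute saddle-stitch page pairing by draining a deque of page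
--     indices inward from both ends (instead of index arithmetic)."""
--     padded = total_pages
--     if padded % 4 != 0:
--         padded += 4 - (padded % 4)
--
--     pages = deque(range(padded))
--     sheets = []
--     while pages:
--         front_left = pages.pop()
--         front_right = pages.popleft()
--         sheets.append((front_left, front_right))
--         back_left = pages.popleft()
--         back_right = pages.pop()
--         sheets.append((back_left, back_right))
--
--     return sheets, padded
-- ===== Notes on version B (the rewrite author's own statement) =====
-- stated objective: alternative
-- what changed: Replaces the closed-form index arithmetic per sheet with a deque of page indices that is drained inward from both ends (pop/popleft pairs), so no index is ever computed from i.
import Mathlib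
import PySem

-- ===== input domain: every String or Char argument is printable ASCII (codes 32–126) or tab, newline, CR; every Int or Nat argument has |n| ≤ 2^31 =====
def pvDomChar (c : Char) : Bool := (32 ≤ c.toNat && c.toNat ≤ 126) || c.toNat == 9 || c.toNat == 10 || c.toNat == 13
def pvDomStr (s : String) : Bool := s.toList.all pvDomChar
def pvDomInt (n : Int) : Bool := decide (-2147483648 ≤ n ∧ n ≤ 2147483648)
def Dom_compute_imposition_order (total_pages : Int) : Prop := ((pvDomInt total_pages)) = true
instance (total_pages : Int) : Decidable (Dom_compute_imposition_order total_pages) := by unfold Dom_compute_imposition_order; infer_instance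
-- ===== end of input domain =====

-- B replaces the closed-form index arithmetic by draining a deque of page indices
-- inward from both ends (objective: alternative decomposition, same cost).

-- ===== PORT A =====
def compute_imposition_order (total_pages : Int) : (List (Int × Int)) × Int :=
  let padded := total_pages
  let padded := if PySem.Int.mod padded 4 ≠ 0 then padded + (4 - PySem.Int.mod padded 4) else padded
  let sheets :=
    (PySem.List.pyRange 0 (PySem.Int.floordiv padded 4) 1).foldl
      (fun sheets i =>
        sheets ++ [(padded - 1 - 2 * i, 2 * i), (2 * i + 1, padded - 2 - 2 * i)]) []
  (sheets, padded)

-- ===== PORT B =====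
-- the deque drain: pop() / popleft() / append front pair, popleft() / pop() / append back pair
-- (branches where Python's deque would underflow are unreachable from the port,
--  since the deque length is always a multiple of 4; they return what was appended so far)
def pvDrain (pages : List Int) : List (Int × Int) :=
  if h0 : pages = [] then []
  else
    let front_left := pages.getLast h0          -- pages.pop()
    let front_right := pages.head h0            -- pages.popleft()
    let mid := pages.dropLast.tail
    if h1 : mid = [] then [(front_left, front_right)]
    else
      (front_left, front_right) ::
        (mid.head h1, mid.getLast h1) ::        -- back_left = popleft(), back_right = pop()
        pvDrain mid.tail.dropLast
termination_by pages.length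
decreasing_by
  have h := List.length_pos_of_ne_nil h0
  simp only [List.length_dropLast, List.length_tail]
  omega

def compute_imposition_order_alt (total_pages : Int) : (List (Int × Int)) × Int :=
  let padded := total_pages
  let padded := if PySem.Int.mod padded 4 ≠ 0 then padded + (4 - PySem.Int.mod padded 4) else padded
  let pages := PySem.List.pyRange 0 padded 1
  (pvDrain pages, padded)

-- ===== PRECONDITION & SPEC =====
def Spec_compute_imposition_order (total_pages : Int) (out : (List (Int × Int)) × Int) : Prop := out = compute_imposition_order_alt total_pages
instance (total_pages : Int) (out : (List (Int × Int)) × Int) : Decidable (Spec_compute_imposition_order total_pages out) := by unfold Spec_compute_imposition_order; infer_instance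

-- ===== CLAIM (what is proved, stated in full; the proofs are below) =====
def Claim_equal_compute_imposition_order : Prop := ∀ (total_pages : Int), Dom_compute_imposition_order total_pages → Spec_compute_imposition_order total_pages (compute_imposition_order total_pages)

-- ===== LEMMAS AND PROOFS =====

-- common description of the sheet list: n sheets left, current sheet index k
def pvSpecPairs (p : Int) : Nat → Int → List (Int × Int)
  | 0, _ => []
  | n + 1, k => (p - 1 - 2 * k, 2 * k) :: (2 * k + 1, p - 2 - 2 * k) :: pvSpecPairs p n (k + 1)

theorem pvRange_dropLast (a b : Int) (h : a < b) :
    (PySem.List.pyRange a b 1).dropLast = PySem.List.pyRange a (b - 1) 1 := by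
  have h2 : PySem.List.pyRange a ((b - 1) + 1) 1 = PySem.List.pyRange a (b - 1) 1 ++ [b - 1] :=
    PySem.List.pyRange_one_succ_right (by omega)
  have : b - 1 + 1 = b := by omega
  rw [this] at h2
  rw [h2, List.dropLast_concat]

theorem pvRange_getLast (a b : Int) (h : a < b) (hne : PySem.List.pyRange a b 1 ≠ []) :
    (PySem.List.pyRange a b 1).getLast hne = b - 1 := by
  have h2 : PySem.List.pyRange a ((b - 1) + 1) 1 = PySem.List.pyRange a (b - 1) 1 ++ [b - 1] :=
    PySem.List.pyRange_one_succ_right (by omega)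
  have hb : b - 1 + 1 = b := by omega
  rw [hb] at h2
  have hl : (PySem.List.pyRange a b 1).getLast? = some (b - 1) := by rw [h2]; simp
  rw [List.getLast?_eq_some_getLast hne] at hl
  exact Option.some_inj.mp hl

theorem pvRange_head (a b : Int) (h : a < b) (hne : PySem.List.pyRange a b 1 ≠ []) :
    (PySem.List.pyRange a b 1).head hne = a := by
  have := PySem.List.pyRange_one_cons (a := a) (b := b) h
  have hl : (PySem.List.pyRange a b 1).head? = some a := by rw [this]; rfl
  rw [List.head?_eq_some_head hne] at hl
  exact Option.some_inj.mp hl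

theorem pvRange_tail (a b : Int) (h : a < b) :
    (PySem.List.pyRange a b 1).tail = PySem.List.pyRange (a + 1) b 1 := by
  rw [PySem.List.pyRange_one_cons h]; rfl

theorem pvDrain_range (n : Nat) : ∀ (k p : Int), p = 4 * n + 4 * k →
    pvDrain (PySem.List.pyRange (2 * k) (p - 2 * k) 1) = pvSpecPairs p n k := by
  induction n with
  | zero =>
    intro k p hp
    have : p - 2 * k ≤ 2 * k := by omega
    rw [PySem.List.pyRange_one_eq_nil this, pvDrain]
    simp [pvSpecPairs]
  | succ n ih =>
    intro k p hp
    have h1 : 2 * k < p - 2 * k := by omega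
    have hne : PySem.List.pyRange (2 * k) (p - 2 * k) 1 ≠ [] := by
      rw [PySem.List.pyRange_one_cons h1]; simp
    rw [pvDrain, dif_neg hne]
    have hdt : (PySem.List.pyRange (2 * k) (p - 2 * k) 1).dropLast.tail
        = PySem.List.pyRange (2 * k + 1) (p - 2 * k - 1) 1 := by
      rw [pvRange_dropLast _ _ h1, pvRange_tail _ _ (by omega)]
    have h2 : 2 * k + 1 < p - 2 * k - 1 := by omega
    have hne2 : PySem.List.pyRange (2 * k + 1) (p - 2 * k - 1) 1 ≠ [] := by
      rw [PySem.List.pyRange_one_cons h2]; simp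
    simp only [hdt]
    rw [dif_neg hne2]
    have hmt : (PySem.List.pyRange (2 * k + 1) (p - 2 * k - 1) 1).tail.dropLast
        = PySem.List.pyRange (2 * (k + 1)) (p - 2 * (k + 1)) 1 := by
      rw [pvRange_tail _ _ h2, pvRange_dropLast _ _ (by omega)]
      congr 1 <;> omega
    rw [pvRange_getLast _ _ h1, pvRange_head _ _ h1, pvRange_getLast _ _ h2,
      pvRange_head _ _ h2, hmt, ih (k + 1) p (by omega)]
    simp only [pvSpecPairs, List.cons.injEq, Prod.mk.injEq]
    and_intros <;> first | trivial | ring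

theorem pvFoldA_range (p : Int) (n : Nat) : ∀ (k : Int) (acc : List (Int × Int)),
    (PySem.List.pyRange k (k + n) 1).foldl
      (fun sheets i => sheets ++ [(p - 1 - 2 * i, 2 * i), (2 * i + 1, p - 2 - 2 * i)]) acc
    = acc ++ pvSpecPairs p n k := by
  induction n with
  | zero =>
    intro k acc
    have : k + ((0 : Nat) : Int) ≤ k := by simp
    rw [PySem.List.pyRange_one_eq_nil this]
    simp [pvSpecPairs]
  | succ n ih =>
    intro k acc
    have h1 : k < k + ((n + 1 : Nat) : Int) := by push_cast; omega
    rw [PySem.List.pyRange_one_cons h1]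
    have he : k + ((n + 1 : Nat) : Int) = (k + 1) + ((n : Nat) : Int) := by push_cast; ring
    simp only [List.foldl_cons, he, ih]
    simp [pvSpecPairs]

-- ===== VERDICT (by name: the statement is the Claim_ definition above) =====
theorem compute_imposition_order_spec : Claim_equal_compute_imposition_order := by
  intro total_pages _
  unfold Spec_compute_imposition_order compute_imposition_order compute_imposition_order_alt
  simp only
  set p := if PySem.Int.mod total_pages 4 ≠ 0
      then total_pages + (4 - PySem.Int.mod total_pages 4) else total_pages with hp
  refine Prod.ext ?_ rfl
  simp only
  have hmod : PySem.Int.mod total_pages 4 = total_pages % 4 :=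
    PySem.Int.mod_eq_emod_of_pos (by omega)
  have hdvd : p % 4 = 0 := by
    rw [hp, hmod]
    split_ifs with h
    · omega
    · omega
  by_cases hpos : 0 ≤ p
  · obtain ⟨n, hn⟩ : ∃ n : Nat, p = 4 * (n : Int) := ⟨(p / 4).toNat, by omega⟩
    have hq : PySem.Int.floordiv p 4 = (n : Int) := by
      rw [PySem.Int.floordiv_eq_ediv_of_pos (by omega)]; omega
    have hA := pvFoldA_range p n 0 []
    have h0 : (0 : Int) + (n : Int) = PySem.Int.floordiv p 4 := by omega
    rw [h0] at hA
    rw [hA]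
    have hB := pvDrain_range n 0 p (by omega)
    simp only [mul_zero, sub_zero] at hB
    rw [hB]
    simp
  · have hq : PySem.Int.floordiv p 4 ≤ 0 := by
      rw [PySem.Int.floordiv_eq_ediv_of_pos (by omega)]; omega
    rw [PySem.List.pyRange_one_eq_nil hq, PySem.List.pyRange_one_eq_nil (by omega : p ≤ 0)]
    rw [pvDrain]
    simp
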